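-- pv_equiv track=rewrite | github.com/asmanamo/mytest | workingsimplestarray.py | combine_arrays
-- ===== SOURCE A (Python) =====
-- def combine_arrays(config_file, port_mappings):
--     result = []
--     port_mapping_index = 0
--
--     if not isinstance(config_file, list) or not isinstance(port_mappings, list):
--         return ["invalid_arguments_given"]
--
--     i = 0
--     while i < len(config_file):
--         config_line = config_file[i]
--         if config_line.startswith("__"):
--             # This is a header, add it to the output
--             result.append(config_line)
--             port_mapping_index += 1
--             i += 1
--         elif ":" in config_line and port_mapping_index < len(port_mappings) and ":" in port_mappings[port_mapping_index]:
--             # This is a key-value pair, split it and combine with the port mapping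
--             #config_key, config_value = config_line.split(":")
--             #port_mapping_key, port_mapping_value = port_mappings[port_mapping_index].split(":")
--             try:
--                config_key, config_value = config_line.split(":")
--                port_mapping_key, port_mapping_value = port_mappings[port_mapping_index].split(":")
--             except ValueError:
--                return ["invalid_arguments_given"]
--
--             new_key = port_mapping_value.strip()
--             new_value = config_value.strip()
--             result.append(f"{new_key}:{new_value}")
--
--             # Check if the next line also belongs to the same port mapping
--             if i + 1 < len(config_file) and not config_file[i + 1].startswith("__"):
--                 next_config_key = config_file[i + 1].split(":")[0]
--                 if next_config_key == config_key:
--                     # Use the same port mapping for the next configuration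
--                     i += 1
--                     continue
--
--             port_mapping_index += 1
--             i += 1
--         else:
--             # Skip this element, as it doesn't follow the expected format
--             return ["invalid_arguments_given"]
--
--     return result
-- ===== SOURCE B (Python) =====
-- def combine_arrays(config_file, port_mappings):
--     if not isinstance(config_file, list) or not isinstance(port_mappings, list):
--         return ["invalid_arguments_given"]
--
--     # Phase 1: group the config lines into a sequence of items: headers, and
--     # maximal runs of consecutive key-value lines sharing the same key.
--     items = []          # ("header", line) | ("group", [lines])
--     cur = None          # lines of the currently open group, with its key
--     cur_key = None
--     for line in config_file:
--         if line.startswith("__"):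
--             if cur is not None:
--                 items.append(("group", cur))
--                 cur = None
--             items.append(("header", line))
--         else:
--             key = line.split(":")[0]
--             if cur is not None and key == cur_key:
--                 cur.append(line)
--             else:
--                 if cur is not None:
--                     items.append(("group", cur))
--                 cur = [line]
--                 cur_key = key
--     if cur is not None:
--         items.append(("group", cur))
--
--     # Phase 2: each item occupies one port-mapping slot; groups emit one output
--     # line per config line, using the slot's mapped value.
--     result = []
--     for idx, (kind, payload) in enumerate(items):
--         if kind == "header":
--             result.append(payload)
--         else:
--             if idx >= len(port_mappings) or ":" not in port_mappings[idx]: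
--                 return ["invalid_arguments_given"]
--             pparts = port_mappings[idx].split(":")
--             if len(pparts) != 2:
--                 return ["invalid_arguments_given"]
--             pv = pparts[1].strip()
--             for line in payload:
--                 if ":" not in line:
--                     return ["invalid_arguments_given"]
--                 cparts = line.split(":")
--                 if len(cparts) != 2:
--                     return ["invalid_arguments_given"]
--                 result.append(f"{pv}:{cparts[1].strip()}")
--     return result
-- ===== Notes on version B (the rewrite author's own statement) =====
-- stated objective: alternative
-- what changed: Replaces A's while-loop with index arithmetic, lookahead at config_file[i+1] and a continue-driven port_mapping_index protocol by a two-phase pipeline: phase 1 groups the config lines into header items and maximal same-key runs, phase 2 walks the item list with enumerate so each item's position IS its port-mapping slot, emitting one output line per grouped config line.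
import Mathlib
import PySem

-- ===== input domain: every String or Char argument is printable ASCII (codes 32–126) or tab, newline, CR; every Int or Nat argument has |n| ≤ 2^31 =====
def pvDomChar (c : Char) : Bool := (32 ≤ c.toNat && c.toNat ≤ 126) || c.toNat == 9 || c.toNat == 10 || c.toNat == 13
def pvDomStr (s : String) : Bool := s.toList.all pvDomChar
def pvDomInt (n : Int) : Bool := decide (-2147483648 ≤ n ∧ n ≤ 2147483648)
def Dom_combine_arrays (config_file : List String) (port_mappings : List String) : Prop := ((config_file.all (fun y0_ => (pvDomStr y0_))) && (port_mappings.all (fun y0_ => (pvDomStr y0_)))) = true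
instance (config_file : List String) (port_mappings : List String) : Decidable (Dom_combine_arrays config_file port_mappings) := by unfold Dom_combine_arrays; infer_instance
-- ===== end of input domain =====

-- B replaces A's lookahead/continue while-loop by a two-phase group-then-emit pipeline (alternative decomposition, same cost).


-- `s.split(":")[0]` — split? with a nonempty separator never fails and never returns [],
-- so Python's [0] is exactly the head (used identically by A's lookahead and B's grouping)
def pyKey0 (s : String) : String := ((PySem.Str.split? s ":").getD []).headD ""

-- ===== PORT A =====
-- A's while-loop over i, port_mapping_index, result; the list argument is the suffix
-- config_file[i:], so config_file[i+1] (the lookahead) is the head of `rest`.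
def combineLoopA (pm : List String) : List String → Nat → List String → List String
  | [], _, res => res
  | line :: rest, pmi, res =>
    if PySem.Str.startswith line "__" then
      combineLoopA pm rest (pmi + 1) (res ++ [line])
    else if PySem.Str.isIn ":" line && decide (pmi < pm.length) && PySem.Str.isIn ":" (pm.getD pmi "") then
      match PySem.Str.split? line ":", PySem.Str.split? (pm.getD pmi "") ":" with
      | some [ck, cv], some [_pk, pv] =>
        let res' := res ++ [PySem.Str.strip pv ++ ":" ++ PySem.Str.strip cv]
        match rest with
        | next :: _ =>
          if !PySem.Str.startswith next "__" && (pyKey0 next == ck) then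
            combineLoopA pm rest pmi res'          -- same key: keep the same port mapping (continue)
          else
            combineLoopA pm rest (pmi + 1) res'
        | [] => combineLoopA pm rest (pmi + 1) res'
      | _, _ => ["invalid_arguments_given"]        -- ValueError from an unpack of ≠ 2 parts
    else ["invalid_arguments_given"]

def combine_arrays (config_file : List String) (port_mappings : List String) : List String :=
  -- the isinstance guard is vacuous under the List String signature
  combineLoopA port_mappings config_file 0 []

-- ===== PORT B =====
inductive CItem
  | header (s : String)
  | group (g : List String)
deriving DecidableEq, Repr

-- flush the open group (Python's `if cur is not None: items.append(("group", cur))`)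
def closeCur : Option (List String × String) → List CItem
  | some (g, _) => [CItem.group g]
  | none => []

-- one iteration of B's phase-1 for-loop; state = (items, cur with its key)
def groupStep (st : List CItem × Option (List String × String)) (line : String) :
    List CItem × Option (List String × String) :=
  if PySem.Str.startswith line "__" then
    (st.1 ++ closeCur st.2 ++ [CItem.header line], none)
  else
    let key := pyKey0 line
    match st.2 with
    | some (g, k) =>
      if key == k then (st.1, some (g ++ [line], k))
      else (st.1 ++ [CItem.group g], some ([line], key))
    | none => (st.1, some ([line], key))

-- B's inner for-loop over one group's lines (early-return invalid = none)
def emitGroup (pv : String) : List String → Option (List String)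
  | [] => some []
  | line :: ls =>
    if PySem.Str.isIn ":" line then
      match PySem.Str.split? line ":" with
      | some [_ck, cv] => (emitGroup pv ls).map (fun outs => (pv ++ ":" ++ PySem.Str.strip cv) :: outs)
      | _ => none
    else none

-- B's phase-2 for-loop over `enumerate(items)`
def emitItems (pm : List String) : List CItem → Nat → List String → List String
  | [], _, res => res
  | CItem.header l :: items, idx, res => emitItems pm items (idx + 1) (res ++ [l])
  | CItem.group g :: items, idx, res =>
    if decide (idx < pm.length) && PySem.Str.isIn ":" (pm.getD idx "") then
      match PySem.Str.split? (pm.getD idx "") ":" with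
      | some [_pk, pv] =>
        match emitGroup (PySem.Str.strip pv) g with
        | some outs => emitItems pm items (idx + 1) (res ++ outs)
        | none => ["invalid_arguments_given"]
      | _ => ["invalid_arguments_given"]
    else ["invalid_arguments_given"]

def combine_arrays_alt (config_file : List String) (port_mappings : List String) : List String :=
  let st := config_file.foldl groupStep ([], none)
  emitItems port_mappings (st.1 ++ closeCur st.2) 0 []

-- ===== PRECONDITION & SPEC =====
def Spec_combine_arrays (config_file : List String) (port_mappings : List String) (out : List String) : Prop := out = combine_arrays_alt config_file port_mappings
instance (config_file : List String) (port_mappings : List String) (out : List String) : Decidable (Spec_combine_arrays config_file port_mappings out) := by unfold Spec_combine_arrays; infer_instance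

-- ===== CLAIM (what is proved, stated in full; the proofs are below) =====
def Claim_equal_combine_arrays : Prop := ∀ (config_file : List String) (port_mappings : List String), Dom_combine_arrays config_file port_mappings → Spec_combine_arrays config_file port_mappings (combine_arrays config_file port_mappings)

-- ===== LEMMAS AND PROOFS =====

-- proof-side recursive description of B's phase-1 fold
def specRec : List String → Option (List String × String) → List CItem
  | [], cur => closeCur cur
  | l :: ls, cur =>
    if PySem.Str.startswith l "__" then
      closeCur cur ++ CItem.header l :: specRec ls none
    else
      match cur with
      | some (g, k) =>
        if pyKey0 l == k then specRec ls (some (g ++ [l], k))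
        else CItem.group g :: specRec ls (some ([l], pyKey0 l))
      | none => specRec ls (some ([l], pyKey0 l))

lemma foldl_groupStep_spec (ls : List String) :
    ∀ (items : List CItem) (cur : Option (List String × String)),
      (ls.foldl groupStep (items, cur)).1 ++ closeCur (ls.foldl groupStep (items, cur)).2
        = items ++ specRec ls cur := by
  induction ls with
  | nil => intro items cur; simp [specRec]
  | cons l ls ih =>
    intro items cur
    simp only [List.foldl_cons, specRec, groupStep]
    by_cases h : PySem.Str.startswith l "__" = true
    · rw [if_pos h, if_pos h]; simp [ih]
    · rw [if_neg h, if_neg h]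
      cases cur with
      | none => simp [ih]
      | some gk =>
        obtain ⟨g, k⟩ := gk
        by_cases hk : (pyKey0 l == k) = true
        · simp only [hk, if_true]; simp [ih]
        · simp only [hk, Bool.false_eq_true, if_false]; simp [ih]

-- the open group is always the first item of specRec, only ever extended at the end
lemma specRec_open_shape (ls : List String) :
    ∀ (g : List String) (k : String),
      ∃ ext items, specRec ls (some (g, k)) = CItem.group (g ++ ext) :: items := by
  induction ls with
  | nil => intro g k; exact ⟨[], [], by simp [specRec, closeCur]⟩
  | cons l ls ih =>
    intro g k
    simp only [specRec]
    by_cases h : PySem.Str.startswith l "__" = true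
    · rw [if_pos h]; exact ⟨[], CItem.header l :: specRec ls none, by simp [closeCur]⟩
    · rw [if_neg h]
      by_cases hk : (pyKey0 l == k) = true
      · obtain ⟨ext, items, hei⟩ := ih (g ++ [l]) k
        simp only [hk, if_true]
        exact ⟨[l] ++ ext, items, by simpa using hei⟩
      · simp only [hk, Bool.false_eq_true, if_false]
        exact ⟨[], specRec ls (some ([l], pyKey0 l)), by simp⟩

lemma emitGroup_append (pv : String) (g h : List String) :
    emitGroup pv (g ++ h) = (emitGroup pv g).bind (fun o => (emitGroup pv h).map (o ++ ·)) := by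
  induction g with
  | nil => simp only [List.nil_append, emitGroup]; cases emitGroup pv h <;> simp
  | cons l g ih =>
    simp only [List.cons_append, emitGroup]
    by_cases hc : PySem.Str.isIn ":" l = true
    · rw [if_pos hc, if_pos hc]
      cases hs : PySem.Str.split? l ":" with
      | none => simp
      | some parts =>
        match parts with
        | [] => simp
        | [a] => simp
        | [a, b] =>
          simp only [ih]
          cases emitGroup pv g <;> cases emitGroup pv h <;> simp
        | a :: b :: c :: t => simp
    · rw [if_neg hc, if_neg hc]; simp

-- an unmatchable slot or a doomed open group makes the whole emission invalid
lemma emitItems_group_invalid (pm : List String) (G : List String) (items : List CItem)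
    (idx : Nat) (res : List String)
    (h : ¬ idx < pm.length ∨ PySem.Str.isIn ":" (pm.getD idx "") = false ∨
      (match PySem.Str.split? (pm.getD idx "") ":" with
       | some [_pk, pv] => emitGroup (PySem.Str.strip pv) G = none
       | _ => True)) :
    emitItems pm (CItem.group G :: items) idx res = ["invalid_arguments_given"] := by
  simp only [emitItems]
  by_cases h1 : idx < pm.length
  · by_cases h2 : PySem.Str.isIn ":" (pm.getD idx "") = true
    · rw [decide_eq_true h1]
      rw [h2]
      simp only [Bool.true_and, if_true]
      rcases h with h | h | h
      · exact absurd h1 h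
      · rw [h2] at h; simp at h
      · cases hs : PySem.Str.split? (pm.getD idx "") ":" with
        | none => rfl
        | some parts =>
          match parts with
          | [] => rfl
          | [a] => rfl
          | [a, b] => rw [hs] at h; simp only at h; simp [h]
          | a :: b :: c :: t => rfl
    · rw [eq_false_of_ne_true h2]
      simp
  · rw [decide_eq_false h1]
    simp

-- the two statements of the mutual invariant
def M1 (pm ls : List String) : Prop :=
  ∀ pmi res, combineLoopA pm ls pmi res = emitItems pm (specRec ls none) pmi res

def M2 (pm ls : List String) : Prop :=
  ∀ pmi res g k pk pv outs,
    pmi < pm.length →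
    PySem.Str.isIn ":" (pm.getD pmi "") = true →
    PySem.Str.split? (pm.getD pmi "") ":" = some [pk, pv] →
    emitGroup (PySem.Str.strip pv) g = some outs →
    emitItems pm (specRec ls (some (g, k))) pmi res =
      (match ls with
       | n :: _ =>
         if !PySem.Str.startswith n "__" && (pyKey0 n == k) then
           combineLoopA pm ls pmi (res ++ outs)
         else
           combineLoopA pm ls (pmi + 1) (res ++ outs)
       | [] => res ++ outs)

lemma pyKey0_of_split (l ck cv : String) (h : PySem.Str.split? l ":" = some [ck, cv]) :
    pyKey0 l = ck := by
  simp [pyKey0, h]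

-- M1/M2 for the empty suffix
lemma M1_nil (pm : List String) : M1 pm [] := by
  intro pmi res; simp [combineLoopA, specRec, closeCur, emitItems]

lemma M2_nil (pm : List String) : M2 pm [] := by
  intro pmi res g k pk pv outs h1 h2 h3 h4
  simp only [specRec, closeCur]
  simp only [emitItems, decide_eq_true h1, h2, Bool.true_and, if_true, h3, h4]

-- emitting one good line
lemma emitGroup_singleton (pv l ck cv : String)
    (hin : PySem.Str.isIn ":" l = true) (hs : PySem.Str.split? l ":" = some [ck, cv]) :
    emitGroup pv [l] = some [pv ++ ":" ++ PySem.Str.strip cv] := by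
  simp only [emitGroup, hin, if_true, hs]; rfl

-- a line that does not split into exactly two parts dooms any group starting with it
lemma emitGroup_cons_bad (pv l : String) (ext : List String)
    (hbad : PySem.Str.isIn ":" l = false ∨
      (match PySem.Str.split? l ":" with
       | some [_ck, _cv] => False
       | _ => True)) :
    emitGroup pv (l :: ext) = none := by
  have h0 : emitGroup pv [l] = none := by
    rcases hbad with h | h
    · simp only [emitGroup, h, Bool.false_eq_true, if_false]
    · simp only [emitGroup]
      by_cases hin : PySem.Str.isIn ":" l = true
      · rw [if_pos hin]
        cases hs : PySem.Str.split? l ":" with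
        | none => rfl
        | some parts =>
          match parts with
          | [] => rfl
          | [a] => rfl
          | [a, b] => rw [hs] at h; simp at h
          | a :: b :: c :: t => rfl
      · rw [if_neg hin]
  have := emitGroup_append pv [l] ext
  rw [h0] at this
  simpa using this

-- a doomed open group makes B's whole emission invalid, whatever follows
lemma emit_open_invalid (pm rest g : List String) (k : String) (pmi : Nat) (res : List String)
    (h : ¬ pmi < pm.length ∨ PySem.Str.isIn ":" (pm.getD pmi "") = false ∨
      (match PySem.Str.split? (pm.getD pmi "") ":" with
       | some [_pk, pv] => emitGroup (PySem.Str.strip pv) g = none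
       | _ => True)) :
    emitItems pm (specRec rest (some (g, k))) pmi res = ["invalid_arguments_given"] := by
  obtain ⟨ext, items, hsh⟩ := specRec_open_shape rest g k
  rw [hsh]
  apply emitItems_group_invalid
  rcases h with h | h | h
  · exact Or.inl h
  · exact Or.inr (Or.inl h)
  · refine Or.inr (Or.inr ?_)
    cases hsp : PySem.Str.split? (pm.getD pmi "") ":" with
    | none => simp
    | some parts =>
      match parts with
      | [] => simp
      | [a] => simp
      | [a, b] =>
        rw [hsp] at h; simp only at h
        simp only
        have := emitGroup_append (PySem.Str.strip b) g ext
        rw [h] at this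
        simpa using this
      | a :: b :: c :: t => simp

lemma main_both (pm : List String) : ∀ n ls, List.length ls ≤ n → M1 pm ls ∧ M2 pm ls := by
  intro n
  induction n with
  | zero =>
    intro ls hls
    have h0 : ls = [] := List.eq_nil_of_length_eq_zero (Nat.le_zero.mp hls)
    subst h0
    exact ⟨M1_nil pm, M2_nil pm⟩
  | succ n ihn =>
    intro ls hls
    cases ls with
    | nil => exact ⟨M1_nil pm, M2_nil pm⟩
    | cons l rest =>
      have hr : rest.length ≤ n := by
        have := hls; simp only [List.length_cons] at this; omega
      obtain ⟨ih1, ih2⟩ := ihn rest hr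
      have hM1 : M1 pm (l :: rest) := by
        intro pmi res
        simp only [specRec]
        by_cases hh : PySem.Str.startswith l "__" = true
        · rw [if_pos hh]
          simp only [combineLoopA, if_pos hh, closeCur, List.nil_append, emitItems]
          exact ih1 (pmi + 1) (res ++ [l])
        · rw [if_neg hh]
          simp only [combineLoopA, if_neg hh]
          by_cases c1 : PySem.Str.isIn ":" l = true
          · by_cases c2 : pmi < pm.length
            · by_cases c3 : PySem.Str.isIn ":" (pm.getD pmi "") = true
              · -- guard true
                have hguard : (PySem.Str.isIn ":" l && decide (pmi < pm.length) &&
                    PySem.Str.isIn ":" (pm.getD pmi "")) = true := by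
                  simp only [c1, c3, c2, decide_true, Bool.and_self]
                rw [hguard, if_pos rfl]
                cases hsl : PySem.Str.split? l ":" with
                | none =>
                  exact (emit_open_invalid pm rest [l] (pyKey0 l) pmi res (Or.inr (Or.inr (by
                    cases hsp : PySem.Str.split? (pm.getD pmi "") ":" with
                    | none => simp
                    | some pparts =>
                      match pparts with
                      | [] => simp
                      | [a] => simp
                      | [a, b] =>
                        simp only
                        exact emitGroup_cons_bad _ l [] (Or.inr (by rw [hsl]; simp))
                      | a :: b :: c :: t => simp)))).symm
                | some cparts =>
                  match cparts with
                  | [] =>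
                    exact (emit_open_invalid pm rest [l] (pyKey0 l) pmi res (Or.inr (Or.inr (by
                      cases hsp : PySem.Str.split? (pm.getD pmi "") ":" with
                      | none => simp
                      | some pparts =>
                        match pparts with
                        | [] => simp
                        | [a] => simp
                        | [a, b] =>
                          simp only
                          exact emitGroup_cons_bad _ l [] (Or.inr (by rw [hsl]; simp))
                        | a :: b :: c :: t => simp)))).symm
                  | [ck] =>
                    exact (emit_open_invalid pm rest [l] (pyKey0 l) pmi res (Or.inr (Or.inr (by
                      cases hsp : PySem.Str.split? (pm.getD pmi "") ":" with
                      | none => simp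
                      | some pparts =>
                        match pparts with
                        | [] => simp
                        | [a] => simp
                        | [a, b] =>
                          simp only
                          exact emitGroup_cons_bad _ l [] (Or.inr (by rw [hsl]; simp))
                        | a :: b :: c :: t => simp)))).symm
                  | ck :: cv :: x :: t =>
                    exact (emit_open_invalid pm rest [l] (pyKey0 l) pmi res (Or.inr (Or.inr (by
                      cases hsp : PySem.Str.split? (pm.getD pmi "") ":" with
                      | none => simp
                      | some pparts =>
                        match pparts with
                        | [] => simp
                        | [a] => simp
                        | [a, b] =>
                          simp only
                          exact emitGroup_cons_bad _ l [] (Or.inr (by rw [hsl]; simp))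
                        | a :: b :: c :: t => simp)))).symm
                  | [ck, cv] =>
                    cases hsp : PySem.Str.split? (pm.getD pmi "") ":" with
                    | none =>
                      exact (emit_open_invalid pm rest [l] (pyKey0 l) pmi res
                        (Or.inr (Or.inr (by rw [hsp]; simp)))).symm
                    | some pparts =>
                      match pparts with
                      | [] =>
                        exact (emit_open_invalid pm rest [l] (pyKey0 l) pmi res
                          (Or.inr (Or.inr (by rw [hsp]; simp)))).symm
                      | [a] =>
                        exact (emit_open_invalid pm rest [l] (pyKey0 l) pmi res
                          (Or.inr (Or.inr (by rw [hsp]; simp)))).symm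
                      | a :: b :: c :: t =>
                        exact (emit_open_invalid pm rest [l] (pyKey0 l) pmi res
                          (Or.inr (Or.inr (by rw [hsp]; simp)))).symm
                      | [a, b] =>
                        rw [pyKey0_of_split l ck cv hsl]
                        rw [ih2 pmi res [l] ck a b [PySem.Str.strip b ++ ":" ++ PySem.Str.strip cv]
                          c2 c3 hsp (emitGroup_singleton (PySem.Str.strip b) l ck cv c1 hsl)]
                        cases rest with
                        | nil => simp [combineLoopA]
                        | cons nxt tail => rfl
              · -- ":" not in the port mapping: guard false
                have hguard : (PySem.Str.isIn ":" l && decide (pmi < pm.length) &&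
                    PySem.Str.isIn ":" (pm.getD pmi "")) = false := by
                  rw [eq_false_of_ne_true c3, Bool.and_false]
                rw [hguard]
                simp only [Bool.false_eq_true, if_false]
                exact (emit_open_invalid pm rest [l] (pyKey0 l) pmi res
                  (Or.inr (Or.inl (eq_false_of_ne_true c3)))).symm
            · -- port mapping index out of range: guard false
              have hguard : (PySem.Str.isIn ":" l && decide (pmi < pm.length) &&
                  PySem.Str.isIn ":" (pm.getD pmi "")) = false := by
                rw [decide_eq_false c2, Bool.and_false, Bool.false_and]
              rw [hguard]
              simp only [Bool.false_eq_true, if_false]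
              exact (emit_open_invalid pm rest [l] (pyKey0 l) pmi res (Or.inl c2)).symm
          · -- ":" not in the line: guard false
            have hguard : (PySem.Str.isIn ":" l && decide (pmi < pm.length) &&
                PySem.Str.isIn ":" (pm.getD pmi "")) = false := by
              rw [eq_false_of_ne_true c1, Bool.false_and, Bool.false_and]
            rw [hguard]
            simp only [Bool.false_eq_true, if_false]
            exact (emit_open_invalid pm rest [l] (pyKey0 l) pmi res (Or.inr (Or.inr (by
              cases hsp : PySem.Str.split? (pm.getD pmi "") ":" with
              | none => simp
              | some pparts =>
                match pparts with
                | [] => simp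
                | [a] => simp
                | [a, b] =>
                  simp only
                  exact emitGroup_cons_bad _ l [] (Or.inl (eq_false_of_ne_true c1))
                | a :: b :: c :: t => simp)))).symm
      have hspec_cons : PySem.Str.startswith l "__" = false →
          specRec (l :: rest) none = specRec rest (some ([l], pyKey0 l)) := by
        intro hf
        simp only [specRec]
        have hf' : ¬ PySem.Str.startswith l "__" = true := by rw [hf]; simp
        rw [if_neg hf']
      have hM2 : M2 pm (l :: rest) := by
        intro pmi res g k pk pv outs h1 h2 h3 h4
        simp only [specRec]
        by_cases hh : PySem.Str.startswith l "__" = true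
        · rw [if_pos hh]
          simp only [closeCur, List.cons_append, List.nil_append]
          simp only [emitItems, decide_eq_true h1, h2, Bool.true_and, if_true, h3, h4]
          simp only [hh, Bool.not_true, Bool.false_and, Bool.false_eq_true, if_false]
          simp only [combineLoopA, if_pos hh]
          exact (ih1 (pmi + 1 + 1) (res ++ outs ++ [l])).symm
        · rw [if_neg hh]
          by_cases hk : (pyKey0 l == k) = true
          · -- same key: the line joins the open group
            simp only [hk, if_true]
            have hkey : pyKey0 l = k := by simpa using hk
            simp only [Bool.and_true, eq_false_of_ne_true hh, Bool.not_false, if_true]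
            simp only [combineLoopA, if_neg hh]
            by_cases c1 : PySem.Str.isIn ":" l = true
            · have hguard : (PySem.Str.isIn ":" l && decide (pmi < pm.length) &&
                  PySem.Str.isIn ":" (pm.getD pmi "")) = true := by
                simp only [c1, h2, h1, decide_true, Bool.and_self]
              rw [hguard, if_pos rfl]
              cases hsl : PySem.Str.split? l ":" with
              | none =>
                exact emit_open_invalid pm rest (g ++ [l]) k pmi res (Or.inr (Or.inr (by
                  rw [h3]
                  simp only
                  rw [emitGroup_append, h4]
                  simp [emitGroup_cons_bad _ l [] (Or.inr (by rw [hsl]; simp))])))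
              | some cparts =>
                match cparts with
                | [] =>
                  exact emit_open_invalid pm rest (g ++ [l]) k pmi res (Or.inr (Or.inr (by
                    rw [h3]
                    simp only
                    rw [emitGroup_append, h4]
                    simp [emitGroup_cons_bad _ l [] (Or.inr (by rw [hsl]; simp))])))
                | [ck] =>
                  exact emit_open_invalid pm rest (g ++ [l]) k pmi res (Or.inr (Or.inr (by
                    rw [h3]
                    simp only
                    rw [emitGroup_append, h4]
                    simp [emitGroup_cons_bad _ l [] (Or.inr (by rw [hsl]; simp))])))
                | ck :: cv :: x :: t =>
                  exact emit_open_invalid pm rest (g ++ [l]) k pmi res (Or.inr (Or.inr (by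
                    rw [h3]
                    simp only
                    rw [emitGroup_append, h4]
                    simp [emitGroup_cons_bad _ l [] (Or.inr (by rw [hsl]; simp))])))
                | [ck, cv] =>
                  rw [h3]
                  have hck : ck = k := by
                    rw [← pyKey0_of_split l ck cv hsl]; exact hkey
                  have hem : emitGroup (PySem.Str.strip pv) (g ++ [l]) =
                      some (outs ++ [PySem.Str.strip pv ++ ":" ++ PySem.Str.strip cv]) := by
                    rw [emitGroup_append, h4,
                      emitGroup_singleton (PySem.Str.strip pv) l ck cv c1 hsl]
                    rfl
                  rw [ih2 pmi res (g ++ [l]) k pk pv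
                    (outs ++ [PySem.Str.strip pv ++ ":" ++ PySem.Str.strip cv]) h1 h2 h3 hem]
                  rw [hck]
                  cases rest with
                  | nil => simp [combineLoopA]
                  | cons nxt tail => simp [List.append_assoc]
            · have hguard : (PySem.Str.isIn ":" l && decide (pmi < pm.length) &&
                  PySem.Str.isIn ":" (pm.getD pmi "")) = false := by
                rw [eq_false_of_ne_true c1, Bool.false_and, Bool.false_and]
              rw [hguard]
              simp only [Bool.false_eq_true, if_false]
              exact emit_open_invalid pm rest (g ++ [l]) k pmi res (Or.inr (Or.inr (by
                rw [h3]
                simp only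
                rw [emitGroup_append, h4]
                simp [emitGroup_cons_bad _ l [] (Or.inl (eq_false_of_ne_true c1))])))
          · -- different key: the open group closes, the line starts a new one
            simp only [hk, Bool.false_eq_true, if_false]
            simp only [Bool.and_false, Bool.false_eq_true, if_false]
            simp only [emitItems, decide_eq_true h1, h2, Bool.true_and, if_true, h3, h4]
            rw [← hspec_cons (eq_false_of_ne_true hh)]
            exact (hM1 (pmi + 1) (res ++ outs)).symm
      exact ⟨hM1, hM2⟩

-- ===== VERDICT (by name: the statement is the Claim_ definition above) =====
theorem combine_arrays_spec : Claim_equal_combine_arrays := by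
  intro cf pm _
  unfold Spec_combine_arrays combine_arrays
  show combineLoopA pm cf 0 [] =
    emitItems pm ((cf.foldl groupStep ([], none)).1 ++ closeCur (cf.foldl groupStep ([], none)).2) 0 []
  rw [foldl_groupStep_spec]
  exact ((main_both pm cf.length cf le_rfl).1) 0 []
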